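-- pv_equiv track=rewrite | github.com/Maksim-Sebelev/Cache | belady.py | belady_size_1_correct
-- ===== SOURCE A (Python) =====
-- def belady_size_1_correct(access_sequence):
--     cache = None  # В кеше может быть только один элемент
--     hits = 0
--
--     for i, current_item in enumerate(access_sequence):
--         if cache == current_item:
--             hits += 1  # Попадание!
--             # message("HIT: элемент уже в кеше")
--         else:
--             # Промах - анализируем будущие запросы
--             future_requests = access_sequence[i+1:]
--
--             if current_item in future_requests:
--                 # Текущий элемент понадобится в будущем - кладем в кеш
--                 cache = current_item
--                 # message(f"MISS: кладем {current_item} в кеш (понадобится в будущем)")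
--             else:
--                 # Текущий элемент больше не понадобится - НЕ кладем в кеш!
--                 # Но обрабатываем запрос (отдаем пользователю)
--                 # message(f"MISS: обрабатываем {current_item} без помещения в кеш")
--                 pass  # Не меняем кеш!
--
--     return hits
-- ===== SOURCE B (Python) =====
-- def belady_size_1_correct(access_sequence):
--     # Two staged passes, no cache simulation: a backward pass flags positions whose
--     # item occurs again later; a forward pass counts matches against the last flagged item.
--     seen = set()
--     recurs = []
--     for x in reversed(access_sequence):
--         recurs.append(x in seen)
--         seen.add(x)
--     recurs.reverse()
--     hits = 0
--     last = None
--     for x, flag in zip(access_sequence, recurs):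
--         if last == x:
--             hits += 1
--         if flag:
--             last = x
--     return hits
-- ===== Notes on version B (the rewrite author's own statement) =====
-- stated objective: faster
-- what changed: Dropped the cache simulation entirely: a backward pass with a seen-set marks each position whose item recurs later, then a forward pass counts positions equal to the last marked item (the size-1 Belady cache always holds exactly the last element known to recur).
import Mathlib
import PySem

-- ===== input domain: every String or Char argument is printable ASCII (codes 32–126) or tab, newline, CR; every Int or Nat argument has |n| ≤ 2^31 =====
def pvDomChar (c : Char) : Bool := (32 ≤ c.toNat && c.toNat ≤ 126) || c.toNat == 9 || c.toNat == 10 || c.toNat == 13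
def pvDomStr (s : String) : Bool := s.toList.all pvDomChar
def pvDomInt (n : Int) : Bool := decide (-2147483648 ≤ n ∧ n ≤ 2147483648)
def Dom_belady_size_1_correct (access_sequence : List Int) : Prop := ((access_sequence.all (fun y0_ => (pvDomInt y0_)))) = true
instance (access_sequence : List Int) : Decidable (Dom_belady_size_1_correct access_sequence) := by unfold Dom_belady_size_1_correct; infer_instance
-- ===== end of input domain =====

-- B drops A's cache simulation: a backward seen-set pass flags items that recur later,
-- a forward pass counts matches against the last flagged item (O(n) instead of O(n^2)).

-- ===== PORT A =====
-- loop body of A: if cache == x: hits += 1 else: if x in access_sequence[i+1:]: cache = x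
def beladyStepA (full : List Int) (s : Option Int × Int) (p : Int × Int) : Option Int × Int :=
  if s.1 = some p.2 then (s.1, s.2 + 1)
  else
    let future := PySem.List.slice full (some (p.1 + 1)) none
    if p.2 ∈ future then (some p.2, s.2) else s

def belady_size_1_correct (access_sequence : List Int) : Int :=
  ((PySem.List.enumerate access_sequence 0).foldl (beladyStepA access_sequence) (none, 0)).2

-- ===== PORT B =====
-- backward loop body: recurs.append(x in seen); seen.add(x)
def beladyFlagStep (s : PySem.Set Int × List Bool) (x : Int) : PySem.Set Int × List Bool :=
  (PySem.Set.add s.1 x, s.2 ++ [PySem.Set.contains s.1 x])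

-- forward loop body: if last == x: hits += 1;  if flag: last = x
def beladyCountStep (s : Option Int × Int) (p : Int × Bool) : Option Int × Int :=
  let hits := if s.1 = some p.1 then s.2 + 1 else s.2
  (if p.2 then some p.1 else s.1, hits)

def belady_size_1_correct_alt (access_sequence : List Int) : Int :=
  let recurs := ((access_sequence.reverse.foldl beladyFlagStep (PySem.Set.empty, [])).2).reverse
  ((access_sequence.zip recurs).foldl beladyCountStep (none, 0)).2

-- ===== PRECONDITION & SPEC =====
def Spec_belady_size_1_correct (access_sequence : List Int) (out : Int) : Prop := out = belady_size_1_correct_alt access_sequence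
instance (access_sequence : List Int) (out : Int) : Decidable (Spec_belady_size_1_correct access_sequence out) := by unfold Spec_belady_size_1_correct; infer_instance

-- ===== CLAIM (what is proved, stated in full; the proofs are below) =====
def Claim_equal_belady_size_1_correct : Prop := ∀ (access_sequence : List Int), Dom_belady_size_1_correct access_sequence → Spec_belady_size_1_correct access_sequence (belady_size_1_correct access_sequence)

-- ===== LEMMAS AND PROOFS =====

-- reference value: hits of the size-1 Belady policy on the suffix, given the cache state
def beladyGold (cache : Option Int) : List Int → Int
  | [] => 0
  | x :: rest =>
      if cache = some x then beladyGold cache rest + 1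
      else if x ∈ rest then beladyGold (some x) rest else beladyGold cache rest

-- final cache of the policy (to state A's loop invariant as a full-state equation)
def beladyCache (cache : Option Int) : List Int → Option Int
  | [] => cache
  | x :: rest =>
      if cache = some x then beladyCache cache rest
      else if x ∈ rest then beladyCache (some x) rest else beladyCache cache rest

-- flags B's backward pass computes, in forward order, relative to an initial seen set
def beladySpecFlags (seen : List Int) : List Int → List Bool
  | [] => []
  | x :: rest => (decide (x ∈ rest) || decide (x ∈ seen)) :: beladySpecFlags seen rest

theorem beladyA_loop (suf : List Int) : ∀ (pre : List Int) (cache : Option Int) (hits : Int),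
    (PySem.List.enumerate suf (pre.length : Int)).foldl (beladyStepA (pre ++ suf)) (cache, hits)
    = (beladyCache cache suf, hits + beladyGold cache suf) := by
  induction suf with
  | nil => intro pre cache hits; simp [beladyCache, beladyGold]
  | cons x rest ih =>
    intro pre cache hits
    rw [PySem.List.enumerate_cons]
    simp only [List.foldl_cons]
    have hdrop : List.drop (pre.length + 1) (pre ++ x :: rest) = rest := by
      rw [show pre.length + 1 = (pre ++ [x]).length by simp,
          show pre ++ x :: rest = (pre ++ [x]) ++ rest by simp]
      simp
    have hslice : PySem.List.slice (pre ++ x :: rest) (some ((pre.length : Int) + 1)) none = rest := by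
      rw [show ((pre.length : Int) + 1) = ((pre.length + 1 : Nat) : Int) by push_cast; ring,
          PySem.List.slice_from_natCast, hdrop]
    have harr : pre ++ x :: rest = (pre ++ [x]) ++ rest := by simp
    have hlen : ((pre.length : Int) + 1) = (((pre ++ [x]).length : Int)) := by simp
    by_cases hc : cache = some x
    · rw [show beladyStepA (pre ++ x :: rest) (cache, hits) ((pre.length : Int), x)
            = (cache, hits + 1) by simp [beladyStepA, hc]]
      rw [harr, hlen, hc, ih (pre ++ [x]) (some x) (hits + 1)]
      simp [beladyCache, beladyGold]
      ring
    · by_cases hm : x ∈ rest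
      · rw [show beladyStepA (pre ++ x :: rest) (cache, hits) ((pre.length : Int), x)
              = (some x, hits) by simp [beladyStepA, hc, hslice, hm]]
        rw [harr, hlen, ih (pre ++ [x]) (some x) hits]
        simp [beladyCache, beladyGold, hc, hm]
      · rw [show beladyStepA (pre ++ x :: rest) (cache, hits) ((pre.length : Int), x)
              = (cache, hits) by simp [beladyStepA, hc, hslice, hm]]
        rw [harr, hlen, ih (pre ++ [x]) cache hits]
        simp [beladyCache, beladyGold, hc, hm]

-- B's backward loop: flags accumulated (in reverse) are beladySpecFlags, seen collects the elements
theorem beladyB_flags (xs : List Int) : ∀ (seen : PySem.Set Int) (fl : List Bool),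
    xs.reverse.foldl beladyFlagStep (seen, fl)
    = (xs.reverse.foldl PySem.Set.add seen, fl ++ (beladySpecFlags seen xs).reverse) := by
  induction xs with
  | nil => intro seen fl; simp [beladySpecFlags]
  | cons x rest ih =>
    intro seen fl
    simp only [List.reverse_cons, List.foldl_append, List.foldl_cons, List.foldl_nil, ih]
    have hmem : x ∈ rest.reverse.foldl PySem.Set.add seen ↔ x ∈ rest ∨ x ∈ seen := by
      have := PySem.Set.mem_foldl_add (f := fun (b : Int) => b) (l := rest.reverse) (s := seen) (y := x)
      simp only [List.mem_reverse] at this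
      simpa [or_comm] using this
    have hdec : decide (x ∈ List.foldr (fun (a : Int) (y : PySem.Set Int) => y.add a) seen rest)
        = (decide (x ∈ rest) || decide (x ∈ seen)) := by
      rw [List.foldl_reverse] at hmem
      by_cases h1 : x ∈ rest <;> by_cases h2 : x ∈ seen <;> simp [hmem, h1, h2]
    simp [beladyFlagStep, beladySpecFlags, List.foldl_reverse, hdec]

-- B's forward loop computes the same hit count as the policy: its 'last' IS the policy's cache
theorem beladyB_count (xs : List Int) : ∀ (cache : Option Int) (hits : Int),
    ((xs.zip (beladySpecFlags [] xs)).foldl beladyCountStep (cache, hits)).2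
    = hits + beladyGold cache xs := by
  induction xs with
  | nil => intro cache hits; simp [beladySpecFlags, beladyGold]
  | cons x rest ih =>
    intro cache hits
    simp only [beladySpecFlags, List.zip_cons_cons, List.foldl_cons]
    by_cases hm : x ∈ rest
    · by_cases hc : cache = some x
      · rw [show beladyCountStep (cache, hits) (x, decide (x ∈ rest) || decide (x ∈ ([] : List Int)))
              = (some x, hits + 1) by simp [beladyCountStep, hc, hm]]
        rw [ih (some x) (hits + 1)]
        simp [beladyGold, hc]
        ring
      · rw [show beladyCountStep (cache, hits) (x, decide (x ∈ rest) || decide (x ∈ ([] : List Int)))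
              = (some x, hits) by simp [beladyCountStep, hc, hm]]
        rw [ih (some x) hits]
        simp [beladyGold, hc, hm]
    · by_cases hc : cache = some x
      · rw [show beladyCountStep (cache, hits) (x, decide (x ∈ rest) || decide (x ∈ ([] : List Int)))
              = (cache, hits + 1) by simp [beladyCountStep, hc, hm]]
        rw [ih cache (hits + 1)]
        simp [beladyGold, hc]
        ring
      · rw [show beladyCountStep (cache, hits) (x, decide (x ∈ rest) || decide (x ∈ ([] : List Int)))
              = (cache, hits) by simp [beladyCountStep, hc, hm]]
        rw [ih cache hits]
        simp [beladyGold, hc, hm]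

-- ===== VERDICT (by name: the statement is the Claim_ definition above) =====
theorem belady_size_1_correct_spec : Claim_equal_belady_size_1_correct := by
  intro xs _
  unfold Spec_belady_size_1_correct belady_size_1_correct belady_size_1_correct_alt
  have hA := beladyA_loop xs [] none 0
  simp only [List.length_nil, Nat.cast_zero, List.nil_append] at hA
  rw [hA, beladyB_flags xs PySem.Set.empty []]
  simp only [List.nil_append, List.reverse_reverse]
  rw [show (PySem.Set.empty : PySem.Set Int) = ([] : List Int) from rfl]
  rw [beladyB_count xs none 0]
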